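-- pv_equiv track=rewrite | github.com/lanko321/DataScraper_Prototype | utils/input_normalization.py | _capitalize_segment
-- ===== SOURCE A (Python) =====
-- def _capitalize_segment(segment: str) -> str:
--     """Capitalize a word segment, preserving hyphen-separated parts."""
--     parts = []
--     for part in segment.split("-"):
--         if not part:
--             parts.append(part)
--             continue
--         parts.append(part[0].upper() + part[1:].lower())
--     return "-".join(parts)
-- ===== SOURCE B (Python) =====
-- def _capitalize_segment(segment: str) -> str:
--     """Capitalize a word segment, preserving hyphen-separated parts."""
--     out = []
--     at_start = True
--     for ch in segment:
--         if ch == "-":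
--             out.append("-")
--             at_start = True
--         elif at_start:
--             out.append(ch.upper())
--             at_start = False
--         else:
--             out.append(ch.lower())
--     return "".join(out)
-- ===== Notes on version B (the rewrite author's own statement) =====
-- stated objective: alternative
-- what changed: Replaces split-on-hyphen / per-part capitalize / join with a single left-to-right pass over the characters driven by an at_start flag reset after each hyphen.
import Mathlib
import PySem

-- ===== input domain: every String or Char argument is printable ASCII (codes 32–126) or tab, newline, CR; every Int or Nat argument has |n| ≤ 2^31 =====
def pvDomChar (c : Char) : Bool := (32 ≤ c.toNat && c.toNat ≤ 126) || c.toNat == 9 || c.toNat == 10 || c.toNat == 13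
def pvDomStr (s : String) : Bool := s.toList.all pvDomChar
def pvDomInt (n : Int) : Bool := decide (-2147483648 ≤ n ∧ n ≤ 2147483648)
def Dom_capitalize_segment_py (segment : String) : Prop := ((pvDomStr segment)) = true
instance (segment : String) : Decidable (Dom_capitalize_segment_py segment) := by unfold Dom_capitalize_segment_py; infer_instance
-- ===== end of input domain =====

-- B replaces A's split-on-hyphen / capitalize-each-part / join with a single character pass
-- driven by an at_start flag (alternative decomposition, same cost).


-- ===== PORT A =====
-- for part in segment.split("-"): if not part: parts.append(part) else parts.append(part[0].upper() + part[1:].lower()); "-".join(parts)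
def capitalize_segment_py (segment : String) : String :=
  let parts := (PySem.Chars.splitOn segment.toList ['-']).foldl
    (fun acc part =>
      if part.length == 0 then acc ++ [part]
      else acc ++ [(match PySem.List.pyGet? part (0 : Int) with
                    | some c => [PySem.Chars.upperChar c]   -- part[0].upper(); part ≠ [] here
                    | none => []) ++
                   PySem.Chars.lower (PySem.List.slice part (some 1) none)]) []
  String.mk (PySem.Chars.join ['-'] parts)

-- ===== PORT B =====
def pvCapGo : List Char → Bool → List Char
  | [], _ => []
  | c :: cs, atStart =>
    if c = '-' then '-' :: pvCapGo cs true
    else if atStart then PySem.Chars.upperChar c :: pvCapGo cs false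
    else PySem.Chars.lowerChar c :: pvCapGo cs false

def capitalize_segment_py_alt (segment : String) : String :=
  String.mk (pvCapGo segment.toList true)

-- ===== PRECONDITION & SPEC =====
def Spec_capitalize_segment_py (segment : String) (out : String) : Prop := out = capitalize_segment_py_alt segment
instance (segment : String) (out : String) : Decidable (Spec_capitalize_segment_py segment out) := by unfold Spec_capitalize_segment_py; infer_instance

-- ===== CLAIM (what is proved, stated in full; the proofs are below) =====
def Claim_equal_capitalize_segment_py : Prop := ∀ (segment : String), Dom_capitalize_segment_py segment → Spec_capitalize_segment_py segment (capitalize_segment_py segment)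

-- ===== LEMMAS AND PROOFS =====

-- structural splitter: (first '-'-free part, remaining parts)
def pvSplit : List Char → List Char × List (List Char)
  | [] => ([], [])
  | c :: rest =>
    if c = '-' then ([], (pvSplit rest).1 :: (pvSplit rest).2)
    else (c :: (pvSplit rest).1, (pvSplit rest).2)

-- what A does to one part
def pvCap : List Char → List Char
  | [] => []
  | c :: rest => PySem.Chars.upperChar c :: PySem.Chars.lower rest

lemma pvGo_spec (cs : List Char) : ∀ (fuel : Nat) (cur : List Char) (acc : List (List Char)),
    cs.length ≤ fuel →
    PySem.Chars.splitOn.go ['-'] fuel cs cur acc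
      = acc.reverse ++ (cur.reverse ++ (pvSplit cs).1) :: (pvSplit cs).2 := by
  induction cs with
  | nil =>
    intro fuel cur acc _
    cases fuel <;> simp [PySem.Chars.splitOn.go, pvSplit]
  | cons c rest ih =>
    intro fuel cur acc hf
    cases fuel with
    | zero => simp at hf
    | succ f =>
      by_cases hc : c = '-'
      · subst hc
        have h1 : PySem.Chars.splitOn.go ['-'] (f + 1) ('-' :: rest) cur acc
            = PySem.Chars.splitOn.go ['-'] f rest [] (cur.reverse :: acc) := by
          rw [PySem.Chars.splitOn.go.eq_def]
          simp [List.isPrefixOf]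
        rw [h1, ih f [] (cur.reverse :: acc) (by simpa using Nat.le_of_succ_le_succ hf)]
        simp [pvSplit]
      · have hbeq : (('-' : Char) == c) = false := by
          simp [beq_eq_false_iff_ne]; exact fun h => hc h.symm
        have h1 : PySem.Chars.splitOn.go ['-'] (f + 1) (c :: rest) cur acc
            = PySem.Chars.splitOn.go ['-'] f rest (c :: cur) acc := by
          rw [PySem.Chars.splitOn.go.eq_def]
          simp [List.isPrefixOf, hbeq]
        rw [h1, ih f (c :: cur) acc (Nat.le_of_succ_le_succ hf)]
        simp [pvSplit, hc]

lemma pvSplitOn_eq (cs : List Char) :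
    PySem.Chars.splitOn cs ['-'] = (pvSplit cs).1 :: (pvSplit cs).2 := by
  have := pvGo_spec cs (cs.length + 1) [] [] (Nat.le_succ _)
  simpa [PySem.Chars.splitOn] using this

lemma pvFoldl_map (l : List (List Char)) (g : List Char → List Char) :
    ∀ acc, l.foldl (fun acc part => acc ++ [g part]) acc = acc ++ l.map g := by
  induction l with
  | nil => simp
  | cons x xs ih => intro acc; simp [ih]

-- A's loop body equals pvCap on every part
lemma pvBody_eq (part : List Char) :
    (if part.length == 0 then part
     else (match PySem.List.pyGet? part (0 : Int) with
           | some c => [PySem.Chars.upperChar c]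
           | none => []) ++ PySem.Chars.lower (PySem.List.slice part (some 1) none))
    = pvCap part := by
  cases part with
  | nil => simp [pvCap]
  | cons c rest =>
    have h1 : PySem.List.pyGet? (c :: rest) (0 : Int) = some c := by
      simp [PySem.List.pyGet?, PySem.List.pyIdx?]
    have h2 : PySem.List.slice (c :: rest) (some 1) none = rest := by
      rw [PySem.List.slice_from _ (by norm_num)]; simp
    simp [h1, h2, pvCap]

lemma pvJoin_head_cons (a : Char) (x : List Char) (xs : List (List Char)) :
    PySem.Chars.join ['-'] ((a :: x) :: xs) = a :: PySem.Chars.join ['-'] (x :: xs) := by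
  cases xs with
  | nil => simp [PySem.Chars.join_singleton]
  | cons y ys => simp [PySem.Chars.join_cons_cons]

lemma pvCapGo_spec (cs : List Char) :
    pvCapGo cs true
      = PySem.Chars.join ['-'] (pvCap (pvSplit cs).1 :: ((pvSplit cs).2).map pvCap)
    ∧ pvCapGo cs false
      = PySem.Chars.join ['-'] (PySem.Chars.lower (pvSplit cs).1 :: ((pvSplit cs).2).map pvCap) := by
  induction cs with
  | nil => simp [pvCapGo, pvSplit, pvCap, PySem.Chars.join_singleton, PySem.Chars.lower]
  | cons c rest ih =>
    by_cases hc : c = '-'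
    · subst hc
      constructor <;>
      · simp only [pvCapGo, pvSplit, if_true, List.map_cons]
        rw [PySem.Chars.join_cons_cons, ih.1]
        simp [pvCap, PySem.Chars.lower]
    · constructor
      · simp only [pvCapGo, if_neg hc, if_pos rfl, pvSplit, if_neg hc]
        rw [ih.2]
        show _ = PySem.Chars.join ['-'] (pvCap (c :: (pvSplit rest).1) :: _)
        simp [pvCap, PySem.Chars.lower, pvJoin_head_cons]
      · simp only [pvCapGo, if_neg hc, pvSplit, if_neg hc]
        rw [ih.2]
        show _ = PySem.Chars.join ['-'] (PySem.Chars.lower (c :: (pvSplit rest).1) :: _)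
        simp [PySem.Chars.lower, pvJoin_head_cons]

-- ===== VERDICT (by name: the statement is the Claim_ definition above) =====
theorem capitalize_segment_py_spec : Claim_equal_capitalize_segment_py := by
  intro segment _
  unfold Spec_capitalize_segment_py capitalize_segment_py capitalize_segment_py_alt
  rw [pvSplitOn_eq]
  have hfold := pvFoldl_map ((pvSplit segment.toList).1 :: (pvSplit segment.toList).2)
      pvCap []
  simp only []
  rw [show (fun (acc : List (List Char)) (part : List Char) =>
        if part.length == 0 then acc ++ [part]
        else acc ++ [(match PySem.List.pyGet? part (0 : Int) with
                      | some c => [PySem.Chars.upperChar c]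
                      | none => []) ++
                     PySem.Chars.lower (PySem.List.slice part (some 1) none)])
      = (fun acc part => acc ++ [pvCap part]) from ?_, hfold]
  · rw [(pvCapGo_spec segment.toList).1]; simp
  · funext acc part
    rw [← pvBody_eq part]
    by_cases h : part.length == 0 <;> simp [h]
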